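-- pv_equiv track=rewrite | github.com/whitelunarium/pages_fork | scripts/convert_docx.py | format_sticky_notes
-- ===== SOURCE A (Python) =====
-- def format_sticky_notes(notes_lines):
--     """Format sticky notes as a clean list or grid"""
--     if len(notes_lines) <= 1:
--         return notes_lines
--
--     formatted = [notes_lines[0]]  # Keep header
--     formatted.append("")
--
--     # Group notes into a grid-like structure
--     notes_content = notes_lines[1:]
--     for i, note in enumerate(notes_content):
--         if i % 3 == 0 and i > 0:
--             formatted.append("")  # Add spacing every 3 items
--         formatted.append(f"- {note}")
--
--     return formatted
-- ===== SOURCE B (Python) =====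
-- def format_sticky_notes(notes_lines):
--     """Format sticky notes as a clean list or grid"""
--     if len(notes_lines) <= 1:
--         return notes_lines
--     notes = notes_lines[1:]
--     out = [notes_lines[0], ""]
--     out += ["- " + n for n in notes[0:3]]
--     i = 3
--     while i < len(notes):
--         out.append("")
--         out += ["- " + n for n in notes[i:i + 3]]
--         i += 3
--     return out
-- ===== Notes on version B (the rewrite author's own statement) =====
-- stated objective: alternative
-- what changed: Replaces the flat per-item loop with its modular i%3 separator counter by explicit grouping: the first chunk of 3 is emitted, then a while loop steps the index by 3 and emits a blank separator followed by each whole chunk.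
import Mathlib
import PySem

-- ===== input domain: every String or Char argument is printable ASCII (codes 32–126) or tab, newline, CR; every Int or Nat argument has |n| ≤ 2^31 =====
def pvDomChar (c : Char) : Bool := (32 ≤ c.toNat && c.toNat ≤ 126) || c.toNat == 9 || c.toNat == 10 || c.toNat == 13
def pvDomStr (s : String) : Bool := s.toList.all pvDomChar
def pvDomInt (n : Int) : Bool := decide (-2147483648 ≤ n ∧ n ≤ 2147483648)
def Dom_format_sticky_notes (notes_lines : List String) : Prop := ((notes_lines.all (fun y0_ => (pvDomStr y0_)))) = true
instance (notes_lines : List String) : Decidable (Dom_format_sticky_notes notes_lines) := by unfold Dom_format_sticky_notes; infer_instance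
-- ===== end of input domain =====

-- B replaces A's flat per-item loop (i % 3 separator counter) by explicit grouping:
-- emit the first chunk of 3, then a while loop steps by 3 emitting "" plus a whole chunk.


-- ===== PORT A =====
-- the for-loop over enumerate(notes_content), carrying (i, formatted) as state
def pvALoop : List String → Nat → List String → List String
  | [], _, acc => acc
  | note :: rest, i, acc =>
      pvALoop rest (i + 1)
        ((if i % 3 = 0 ∧ 0 < i then acc ++ [""] else acc) ++ ["- " ++ note])

def format_sticky_notes (notes_lines : List String) : List String :=
  if notes_lines.length ≤ 1 then notes_lines
  else
    match notes_lines with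
    | [] => notes_lines
    | h :: t => pvALoop t 0 [h, ""]   -- formatted = [notes_lines[0], ""]; t = notes_lines[1:]

-- ===== PORT B =====
-- the while loop: i starts at 3 and steps by 3; each pass appends "" and the chunk notes[i:i+3]
def pvBLoop (notes : List String) (i : Nat) (out : List String) : List String :=
  if _h : i < notes.length then
    pvBLoop notes (i + 3)
      (out ++ "" :: (PySem.List.slice notes (some (i : Int)) (some ((i + 3 : Nat) : Int))).map
        (fun n => "- " ++ n))
  else out
termination_by notes.length - i
decreasing_by omega

def format_sticky_notes_alt (notes_lines : List String) : List String :=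
  if notes_lines.length ≤ 1 then notes_lines
  else
    match notes_lines with
    | [] => notes_lines
    | h :: t =>   -- t = notes_lines[1:]; out = [header, ""] ++ first chunk, then the while loop
      pvBLoop t 3
        ([h, ""] ++ (PySem.List.slice t (some 0) (some ((3 : Nat) : Int))).map (fun n => "- " ++ n))

-- ===== PRECONDITION & SPEC =====
def Spec_format_sticky_notes (notes_lines : List String) (out : List String) : Prop := out = format_sticky_notes_alt notes_lines
instance (notes_lines : List String) (out : List String) : Decidable (Spec_format_sticky_notes notes_lines out) := by unfold Spec_format_sticky_notes; infer_instance

-- ===== CLAIM (what is proved, stated in full; the proofs are below) =====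
def Claim_equal_format_sticky_notes : Prop := ∀ (notes_lines : List String), Dom_format_sticky_notes notes_lines → Spec_format_sticky_notes notes_lines (format_sticky_notes notes_lines)

-- ===== LEMMAS AND PROOFS =====

-- proof-side bridge: the common "chunks of 3 joined by a blank line" shape of the tail output
def pvJoinChunks (notes : List String) : List String :=
  let group := (notes.take 3).map (fun n => "- " ++ n)
  if _h : notes.drop 3 = [] then group
  else group ++ [""] ++ pvJoinChunks (notes.drop 3)
termination_by notes.length
decreasing_by
  simp only [List.drop_eq_nil_iff, not_le] at _h
  simp only [List.length_drop]; omega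

-- unfolding of pvJoinChunks at a full chunk with a nonempty remainder
theorem pvJoinChunks_step (a b c : String) (l : List String) (h : l ≠ []) :
    pvJoinChunks (a :: b :: c :: l)
      = ["- " ++ a, "- " ++ b, "- " ++ c] ++ "" :: pvJoinChunks l := by
  rw [pvJoinChunks]
  simp [h]

-- unfolding of pvJoinChunks when at most one chunk remains
theorem pvJoinChunks_last (l : List String) (h : l.drop 3 = []) :
    pvJoinChunks l = (l.take 3).map (fun n => "- " ++ n) := by
  rw [pvJoinChunks]; simp [h]

-- unfolding of pvJoinChunks when more than one chunk remains
theorem pvJoinChunks_more (l : List String) (h : l.drop 3 ≠ []) :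
    pvJoinChunks l = (l.take 3).map (fun n => "- " ++ n) ++ [""] ++ pvJoinChunks (l.drop 3) := by
  rw [pvJoinChunks]; simp [h]

-- A's loop body only looks at i through i % 3 and i > 0, so for i ≥ 1 the index may shift by 3
theorem pvALoop_shift (l : List String) : ∀ (i : Nat) (acc : List String), 1 ≤ i →
    pvALoop l i acc = pvALoop l (i + 3) acc := by
  induction l with
  | nil => intro i acc _; simp [pvALoop]
  | cons note rest ih =>
      intro i acc hi
      have hc : ((i + 3) % 3 = 0 ∧ 0 < i + 3) = (i % 3 = 0 ∧ 0 < i) := by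
        apply propext; constructor <;> intro h <;> omega
      have hidx : i + 3 + 1 = i + 1 + 3 := by omega
      simp only [pvALoop, hc, hidx]
      split_ifs <;> exact ih (i + 1) _ (by omega)

-- from index 3 (a chunk boundary past the first chunk) A's loop yields "" :: joined chunks
theorem pvALoop_three (l : List String) : l ≠ [] → ∀ acc,
    pvALoop l 3 acc = acc ++ "" :: pvJoinChunks l := by
  match l with
  | [] => intro h; exact absurd rfl h
  | [d] => intro _ acc; simp [pvALoop, pvJoinChunks]
  | [d, e] => intro _ acc; simp [pvALoop, pvJoinChunks]
  | [d, e, f] => intro _ acc; simp [pvALoop, pvJoinChunks]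
  | d :: e :: f :: g :: l3 =>
      intro _ acc
      have step : pvALoop (d :: e :: f :: g :: l3) 3 acc
          = pvALoop (g :: l3) 6 (acc ++ ["", "- " ++ d, "- " ++ e, "- " ++ f]) := by
        simp [pvALoop]
      rw [step, ← pvALoop_shift (g :: l3) 3 _ (by omega),
          pvALoop_three (g :: l3) (by simp) _,
          pvJoinChunks_step d e f (g :: l3) (by simp)]
      simp
termination_by l.length

-- A's loop from index 0 equals the joined chunks appended to the accumulator
theorem pvALoop_zero (t : List String) : t ≠ [] → ∀ acc,
    pvALoop t 0 acc = acc ++ pvJoinChunks t := by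
  match t with
  | [] => intro h; exact absurd rfl h
  | [a] => intro _ acc; simp [pvALoop, pvJoinChunks]
  | [a, b] => intro _ acc; simp [pvALoop, pvJoinChunks]
  | [a, b, c] => intro _ acc; simp [pvALoop, pvJoinChunks]
  | a :: b :: c :: d :: t3 =>
      intro _ acc
      have step : pvALoop (a :: b :: c :: d :: t3) 0 acc
          = pvALoop (d :: t3) 3 (acc ++ ["- " ++ a, "- " ++ b, "- " ++ c]) := by
        simp [pvALoop]
      rw [step, pvALoop_three (d :: t3) (by simp) _,
          pvJoinChunks_step a b c (d :: t3) (by simp)]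
      simp

-- B's while loop from index i yields "" :: joined chunks of the not-yet-emitted suffix
theorem pvBLoop_eq (notes : List String) (i : Nat) (out : List String)
    (hne : notes.drop i ≠ []) :
    pvBLoop notes i out = out ++ "" :: pvJoinChunks (notes.drop i) := by
  have hi : i < notes.length := by
    by_contra hle
    exact hne (List.drop_eq_nil_iff.mpr (by omega))
  have hslice : PySem.List.slice notes (some (i : Int)) (some ((i + 3 : Nat) : Int))
      = (notes.drop i).take 3 := by
    rw [PySem.List.slice_natCast]
    congr 1
    omega
  have hdd : (notes.drop i).drop 3 = notes.drop (i + 3) := by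
    rw [List.drop_drop, Nat.add_comm]
  by_cases h3 : notes.drop (i + 3) = []
  · have hstop : ¬ i + 3 < notes.length := by
      have := List.drop_eq_nil_iff.mp h3; omega
    rw [pvBLoop, dif_pos hi, pvBLoop, dif_neg hstop, hslice,
        pvJoinChunks_last (notes.drop i) (by rw [hdd]; exact h3)]
  · rw [pvBLoop, dif_pos hi, pvBLoop_eq notes (i + 3) _ h3, hslice,
        pvJoinChunks_more (notes.drop i) (by rw [hdd]; exact h3), hdd]
    simp
termination_by notes.length - i
decreasing_by omega

-- ===== VERDICT (by name: the statement is the Claim_ definition above) =====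
theorem format_sticky_notes_spec : Claim_equal_format_sticky_notes := by
  intro notes_lines _
  unfold Spec_format_sticky_notes format_sticky_notes format_sticky_notes_alt
  by_cases h : notes_lines.length ≤ 1
  · simp [h]
  · rw [if_neg h, if_neg h]
    obtain ⟨x, y, t, rfl⟩ : ∃ x y t, notes_lines = x :: y :: t := by
      match notes_lines with
      | [] => simp at h
      | [x] => simp at h
      | x :: y :: t => exact ⟨x, y, t, rfl⟩
    show pvALoop (y :: t) 0 [x, ""]
        = pvBLoop (y :: t) 3
            ([x, ""] ++ (PySem.List.slice (y :: t) (some 0) (some ((3 : Nat) : Int))).map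
              (fun n => "- " ++ n))
    have hslice0 : PySem.List.slice (y :: t) (some 0) (some ((3 : Nat) : Int))
        = (y :: t).take 3 := by
      rw [PySem.List.slice_zero_start, PySem.List.slice_to_natCast]
    rw [pvALoop_zero (y :: t) (by simp) [x, ""], hslice0]
    by_cases h3 : (y :: t).drop 3 = []
    · have hstop : ¬ 3 < (y :: t).length := by
        have := List.drop_eq_nil_iff.mp h3; omega
      rw [pvBLoop, dif_neg hstop, pvJoinChunks_last (y :: t) h3]
    · rw [pvBLoop_eq (y :: t) 3 _ h3, pvJoinChunks_more (y :: t) h3]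
      simp
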